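/- GENERATED by c/gen_decode.py: decode facts of the image, one per distinct instruction byte string. -/
import UserX.DecodeImage

#decode_all Vorbis.Dec
  "0f47c3"  -- cmova eax,ebx
  "0f8492000000"  -- je 10cd4f
  "0f854e020000"  -- jne 1148e7
  "0f8d1affffff"  -- jge 114f26
  "0f9cc2"  -- setl dl
  "0fb774242c"  -- movzx esi,WORD PTR [rsp+0x2c]
  "3c01"  -- cmp al,0x1
  "410fb67618"  -- movzx esi,BYTE PTR [r14+0x18]
  "41807e1a00"  -- cmp BYTE PTR [r14+0x1a],0x0
  "418985e8060000"  -- mov DWORD PTR [r13+0x6e8],eax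
  "418d041c"  -- lea eax,[r12+rbx*1]
  "41d3e4"  -- shl r12d,cl
  "440fb6e9"  -- movzx r13d,cl
  "443bbb80000000"  -- cmp r15d,DWORD PTR [rbx+0x80]
  "4489a304070000"  -- mov DWORD PTR [rbx+0x704],r12d
  "448b642414"  -- mov r12d,DWORD PTR [rsp+0x14]
  "448bbd14ffffff"  -- mov r15d,DWORD PTR [rbp-0xec]
  "4585ff"  -- test r15d,r15d
  "458b7508"  -- mov r14d,DWORD PTR [r13+0x8]
  "4803abd8010000"  -- add rbp,QWORD PTR [rbx+0x1d8]
  "4863d5"  -- movsxd rdx,ebp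
  "4883c448"  -- add rsp,0x48
  "4889542438"  -- mov QWORD PTR [rsp+0x38],rdx
  "488b1424"  -- mov rdx,QWORD PTR [rsp]
  "488b8424a0000000"  -- mov rax,QWORD PTR [rsp+0xa0]
  "488d4703"  -- lea rax,[rdi+0x3]
  "488d7bf4"  -- lea rdi,[rbx-0xc]
  "488dbb00070000"  -- lea rdi,[rbx+0x700]
  "488dbceb88050000"  -- lea rdi,[rbx+rbp*8+0x588]
  "48c1eb03"  -- shr rbx,0x3
  "49035d08"  -- add rbx,QWORD PTR [r13+0x8]
  "4983c710"  -- add r15,0x10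
  "498d2c8c"  -- lea rbp,[r12+rcx*4]
  "498d7f0c"  -- lea rdi,[r15+0xc]
  "4a036ceb08"  -- add rbp,QWORD PTR [rbx+r13*8+0x8]
  "4b8d442d00"  -- lea rax,[r13+r13*1+0x0]
  "4c896308"  -- mov QWORD PTR [rbx+0x8],r12
  "4c8b642440"  -- mov r12,QWORD PTR [rsp+0x40]
  "4c8d3c18"  -- lea r15,[rax+rbx*1]
  "4d63fc"  -- movsxd r15,r12d
  "4e8b44f508"  -- mov r8,QWORD PTR [rbp+r14*8+0x8]
  "660f6ee5"  -- movd xmm4,ebp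
  "6641c704240000"  -- mov WORD PTR [r12],0x0
  "72f1"  -- jb 100e68
  "7463"  -- je 10b523
  "757a"  -- jne 113317
  "7c93"  -- jl 1071cf
  "7eda"  -- jle 10f6a0
  "81e20f0f0f0f"  -- and edx,0xf0f0f0f
  "83e207"  -- and edx,0x7
  "8944244c"  -- mov DWORD PTR [rsp+0x4c],eax
  "899568ffffff"  -- mov DWORD PTR [rbp-0x98],edx
  "8b442430"  -- mov eax,DWORD PTR [rsp+0x30]
  "8b7d90"  -- mov edi,DWORD PTR [rbp-0x70]
  "8d4403ff"  -- lea eax,[rbx+rax*1-0x1]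
  "be10000000"  -- mov esi,0x10
  "c70300000000"  -- mov DWORD PTR [rbx],0x0
  "c783e406000000000000"  -- mov DWORD PTR [rbx+0x6e4],0x0
  "e80534ffff"  -- call 100640
  "e80ef2feff"  -- call 103d00
  "e818f3feff"  -- call 100480
  "e82252ffff"  -- call 100720
  "e82bd3feff"  -- call 100300
  "e834fbfeff"  -- call 103d00
  "e83fbffeff"  -- call 100640
  "e849b6ffff"  -- call 100300
  "e855c5feff"  -- call 1003c0
  "e862acfeff"  -- call 100480
  "e86e10ffff"  -- call 100800
  "e8799effff"  -- call 113980
  "e8841cffff"  -- call 100300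
  "e88f45ffff"  -- call 100800
  "e898f5feff"  -- call 100640
  "e8a2fcffff"  -- call 107500
  "e8ae32ffff"  -- call 100720
  "e8b749ffff"  -- call 100720
  "e8c1affeff"  -- call 1003c0
  "e8cac8feff"  -- call 100800
  "e8d59ffeff"  -- call 100640
  "e8e015ffff"  -- call 100800
  "e8e8b9feff"  -- call 100720
  "e8f0feffff"  -- call 107500
  "e8fc6cffff"  -- call 100720
  "e92cffffff"  -- jmp 10d7dc
  "e975efffff"  -- jmp 113b22
  "e9cbe1ffff"  -- jmp 113b22
  "eb29"  -- jmp 111098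
  "ebba"  -- jmp 100d7a
  "f20f101c24"  -- movsd xmm3,QWORD PTR [rsp]
  "f20f59c1"  -- mulsd xmm0,xmm1
  "f30f101b"  -- movss xmm3,DWORD PTR [rbx]
  "f30f10642404"  -- movss xmm4,DWORD PTR [rsp+0x4]
  "f30f1143e4"  -- movss DWORD PTR [rbx-0x1c],xmm0
  "f30f11642410"  -- movss DWORD PTR [rsp+0x10],xmm4
  "f30f58442410"  -- addss xmm0,DWORD PTR [rsp+0x10]
  "f30f595d00"  -- mulss xmm3,DWORD PTR [rbp+0x0]
  "f30f5cd7"  -- subss xmm2,xmm7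
  "f3410f114424ec"  -- movss DWORD PTR [r12-0x14],xmm0
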